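-- pv_equiv track=rewrite | github.com/paulzfm/flat-py | examples/cases/safe_path.py | sanitized
-- ===== SOURCE A (Python) =====
-- def disallowed(char: str) -> bool:
--     return ord(char) in range(0, 31 + 1) or ord(char) == 127 or char in {'/', '\\', ':'}
--
-- def sanitized(path: str) -> bool:
--     if path.startswith('/'):
--         return False
--     parts = path.split('/')
--     return not any(
--         [part.startswith('-') or part.startswith('.') or part.startswith(' ') or part.endswith(' ') or
--          any([disallowed(ch) for ch in part]) or '  ' in part
--          for part in parts
--          ])
-- ===== SOURCE B (Python) =====
-- def sanitized(path: str) -> bool: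
--     # Single left-to-right scan tracking only the previous character;
--     # '/' as the previous char means "at the start of a part".
--     if path.startswith('/'):
--         return False
--     prev = '/'
--     for c in path:
--         o = ord(c)
--         if o <= 31 or o == 127 or c == '\\' or c == ':':
--             return False
--         if prev == '/' and (c == '-' or c == '.' or c == ' '):
--             return False
--         if c == ' ' and prev == ' ':
--             return False
--         if c == '/' and prev == ' ':
--             return False
--         prev = c
--     return prev != ' '
-- ===== Notes on version B (the rewrite author's own statement) =====
-- stated objective: faster
-- what changed: Replaced split-into-parts plus per-part prefix/suffix/substring/membership checks with a single left-to-right scan that keeps only the previous character as state.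
import Mathlib
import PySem

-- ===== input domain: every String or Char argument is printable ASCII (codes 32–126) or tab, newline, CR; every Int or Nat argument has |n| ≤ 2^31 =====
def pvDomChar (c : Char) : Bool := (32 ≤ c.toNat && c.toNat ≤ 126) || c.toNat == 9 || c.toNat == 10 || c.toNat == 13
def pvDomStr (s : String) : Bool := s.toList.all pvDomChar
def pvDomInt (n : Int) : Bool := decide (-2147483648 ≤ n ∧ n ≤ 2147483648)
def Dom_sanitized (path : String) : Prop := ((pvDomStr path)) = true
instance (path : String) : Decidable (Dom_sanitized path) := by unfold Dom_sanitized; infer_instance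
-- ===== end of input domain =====

-- B replaces A's split-into-parts + per-part string checks by a single scan over the
-- characters keeping only the previous character as state (alternative decomposition).


-- ===== PORT A =====
-- disallowed(char): ord(char) in range(0, 31 + 1) or ord(char) == 127 or char in {'/', '\\', ':'}
def disallowedA (c : Char) : Bool :=
  (c.toNat ≤ 31) || c.toNat == 127 || (c == '/' || c == '\\' || c == ':')

-- the per-part comprehension body of A
def partBadA (part : List Char) : Bool :=
  PySem.Chars.startswith part ['-'] || PySem.Chars.startswith part ['.'] ||
  PySem.Chars.startswith part [' '] || PySem.Chars.endswith part [' '] ||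
  (part.map disallowedA).any id || PySem.Chars.isIn [' ', ' '] part

def sanitized (path : String) : Bool :=
  if PySem.Str.startswith path "/" then false
  else
    -- path.split('/'): the separator is nonempty, so split? is `some`; getD [] unwraps it
    let parts := (PySem.Chars.split? path.toList ['/']).getD []
    !(parts.any partBadA)

-- ===== PORT B =====
-- the forbidden-step test of Source B's loop body (prev = previous char, '/' at a part start)
def badStep (prev c : Char) : Bool :=
  (c.toNat ≤ 31) || c.toNat == 127 || c == '\\' || c == ':' ||
  (prev == '/' && (c == '-' || c == '.' || c == ' ')) ||
  (c == ' ' && prev == ' ') ||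
  (c == '/' && prev == ' ')

-- Source B's for-loop with early returns, as structural recursion over the chars
def scanB (prev : Char) : List Char → Bool
  | [] => prev != ' '
  | c :: cs => if badStep prev c then false else scanB c cs

def sanitized_alt (path : String) : Bool :=
  if PySem.Str.startswith path "/" then false
  else scanB '/' path.toList

-- ===== PRECONDITION & SPEC =====
def Spec_sanitized (path : String) (out : Bool) : Prop := out = sanitized_alt path
instance (path : String) (out : Bool) : Decidable (Spec_sanitized path out) := by unfold Spec_sanitized; infer_instance

-- ===== CLAIM (what is proved, stated in full; the proofs are below) =====
def Claim_equal_sanitized : Prop := ∀ (path : String), Dom_sanitized path → Spec_sanitized path (sanitized path)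

-- ===== LEMMAS AND PROOFS =====

-- recursive model of path.split('/') on the char list
def mySplit : List Char → List (List Char)
  | [] => [[]]
  | c :: cs => if c = '/' then [] :: mySplit cs else (mySplit cs).modifyHead (c :: ·)

lemma modifyHead_triv (l : List (List Char)) :
    List.modifyHead (fun x => ([] : List Char).reverse ++ x) l = l := by
  cases l <;> simp

lemma splitOn_go_slash (fuel : Nat) (l cur : List Char) (acc : List (List Char))
    (h : l.length ≤ fuel) :
    PySem.Chars.splitOn.go ['/'] fuel l cur acc
      = acc.reverse ++ (mySplit l).modifyHead (cur.reverse ++ ·) := by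
  induction fuel generalizing l cur acc with
  | zero =>
    rw [List.length_eq_zero_iff.mp (Nat.le_zero.mp h)]
    simp [PySem.Chars.splitOn.go, mySplit]
  | succ n ih =>
    cases l with
    | nil => simp [PySem.Chars.splitOn.go, mySplit]
    | cons c cs =>
      rw [PySem.Chars.splitOn.go]
      by_cases hc : c = '/'
      · subst hc
        have hpre : (['/'] : List Char).isPrefixOf ('/' :: cs) = true := by simp [List.isPrefixOf]
        simp only [hpre, if_pos, List.length_cons, List.length_nil, Nat.zero_add, List.drop_one,
          List.tail_cons]
        rw [ih cs [] (cur.reverse :: acc) (by simpa using Nat.le_of_succ_le_succ h)]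
        rw [modifyHead_triv]
        simp [mySplit]
      · have hpre : (['/'] : List Char).isPrefixOf (c :: cs) = false := by
          simp [List.isPrefixOf]; intro h'; exact absurd h'.symm hc
        simp only [hpre, Bool.false_eq_true, if_false]
        rw [ih cs (c :: cur) acc (by simpa using Nat.le_of_succ_le_succ h)]
        simp only [mySplit, if_neg hc]
        rw [List.modifyHead_modifyHead]
        congr 2
        funext x
        simp

lemma splitOn_eq_mySplit (l : List Char) :
    PySem.Chars.splitOn l ['/'] = mySplit l := by
  unfold PySem.Chars.splitOn
  rw [splitOn_go_slash _ _ _ _ (by omega)]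
  cases mySplit l <;> simp

lemma mySplit_ne_nil (l : List Char) : mySplit l ≠ [] := by
  cases l with
  | nil => simp [mySplit]
  | cons c cs =>
    simp only [mySplit]
    split_ifs
    · simp
    · cases h : mySplit cs with
      | nil => exact absurd h (mySplit_ne_nil cs)
      | cons a t => simp

-- recursive model of A's per-part checks: partBadR p = "the part p fails some check",
-- contBadR prev p = "continuing a part whose last char so far is prev with p fails one"
def contBadR (prev : Char) : List Char → Bool
  | [] => prev == ' '
  | c :: cs => disallowedA c || (prev == ' ' && c == ' ') || contBadR c cs

def partBadR : List Char → Bool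
  | [] => false
  | c :: cs => (c == '-' || c == '.' || c == ' ') || disallowedA c || contBadR c cs

def hasDbl : List Char → Bool
  | [] => false
  | [_] => false
  | a :: b :: t => (a == ' ' && b == ' ') || hasDbl (b :: t)

lemma hasDbl_cons (c : Char) (cs : List Char) :
    hasDbl (c :: cs) = ((c == ' ' && cs.head? == some ' ') || hasDbl cs) := by
  cases cs <;> simp [hasDbl]

lemma hasDbl_iff_infix (p : List Char) : hasDbl p = true ↔ [' ', ' '] <:+: p := by
  induction p with
  | nil => simp [hasDbl]
  | cons c cs ih =>
    rw [hasDbl_cons, List.infix_cons_iff, Bool.or_eq_true_iff, ih]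
    apply or_congr _ Iff.rfl
    rw [Bool.and_eq_true_iff]
    constructor
    · rintro ⟨h1, h2⟩
      obtain ⟨t, ht⟩ := List.head?_eq_some_iff.mp (by simpa using h2)
      subst ht
      rw [beq_iff_eq.mp h1]
      exact ⟨t, rfl⟩
    · rintro ⟨t, ht⟩
      cases ht
      simp

lemma isIn_dbl (p : List Char) : PySem.Chars.isIn [' ', ' '] p = hasDbl p := by
  cases h : hasDbl p
  · rw [PySem.Chars.isIn_eq_false_iff]
    rw [← hasDbl_iff_infix, h]
    simp
  · rw [PySem.Chars.isIn_iff_infix]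
    exact (hasDbl_iff_infix p).mp h

lemma endswith_space (p : List Char) :
    PySem.Chars.endswith p [' '] = (p.getLast? == some ' ') := by
  unfold PySem.Chars.endswith
  rw [Bool.eq_iff_iff, List.isSuffixOf_iff_suffix, beq_iff_eq]
  constructor
  · rintro ⟨t, rfl⟩; simp
  · intro h
    obtain ⟨l', rfl⟩ := List.getLast?_eq_some_iff.mp h
    exact List.suffix_append l' [' ']

lemma contBadR_eq (p : List Char) (prev : Char) :
    contBadR prev p = (p.any disallowedA || hasDbl (prev :: p) || (p.getLastD prev == ' ')) := by
  induction p generalizing prev with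
  | nil => simp [contBadR, hasDbl]
  | cons c cs ih =>
    simp only [contBadR, ih c, List.any_cons, List.getLastD_cons, hasDbl]
    cases disallowedA c <;> cases hasDbl (c :: cs) <;> cases (prev == ' ' && c == ' ') <;>
      cases cs.any disallowedA <;> simp

lemma partBadA_eq (p : List Char) : partBadA p = partBadR p := by
  cases p with
  | nil => decide
  | cons c cs =>
    simp only [partBadA, partBadR, PySem.Chars.startswith, endswith_space, isIn_dbl,
      contBadR_eq cs c, List.isPrefixOf, List.any_map, List.getLast?_cons, Function.comp_def, id]
    rw [Bool.eq_iff_iff]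
    simp only [Bool.or_eq_true, Bool.and_eq_true, beq_iff_eq, Option.some.injEq,
      List.any_eq_true, List.getLastD_eq_getLast?, @eq_comm Char c, List.exists_mem_cons_iff]
    generalize (∃ x ∈ cs, disallowedA x = true) = P
    tauto

-- what scanB computes, phrased over mySplit ('/' as prev means "at a part start")
def scanRHS (prev : Char) (l : List Char) : Bool :=
  if prev == '/' then !((mySplit l).any partBadR)
  else !(contBadR prev ((mySplit l).headD []) || ((mySplit l).tail).any partBadR)

lemma disallowedA_of_ne_slash (c : Char) (hc : ¬ c = '/') :
    disallowedA c = ((c.toNat ≤ 31) || c.toNat == 127 || c == '\\' || c == ':') := by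
  simp only [disallowedA]
  have : (c == '/') = false := by simp [hc]
  rw [this]
  cases (decide (c.toNat ≤ 31)) <;> cases (c.toNat == 127) <;> cases (c == '\\') <;>
    cases (c == ':') <;> simp

lemma scanB_eq_scanRHS (l : List Char) (prev : Char) : scanB prev l = scanRHS prev l := by
  induction l generalizing prev with
  | nil =>
    by_cases hp : prev = '/'
    · subst hp; decide
    · simp [scanB, scanRHS, hp, mySplit, contBadR, bne]
  | cons c cs ih =>
    obtain ⟨h0, t0, hsp⟩ : ∃ h t, mySplit cs = h :: t := by
      cases h : mySplit cs with
      | nil => exact absurd h (mySplit_ne_nil cs)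
      | cons a t => exact ⟨a, t, rfl⟩
    by_cases hc : c = '/'
    · subst hc
      by_cases hp : prev = '/'
      · subst hp
        simp [scanB, scanRHS, badStep, mySplit, partBadR, ih '/']
      · have hpb : (prev == '/') = false := by simp [hp]
        have hbs : badStep prev '/' = (prev == ' ') := by
          simp [badStep, hpb]
        cases hps : (prev == ' ')
        · simp only [scanB, hbs, hps, Bool.false_eq_true, if_false, ih '/']
          simp [scanRHS, hpb, mySplit, contBadR, hps]
        · simp [scanB, hbs, hps, scanRHS, hpb, mySplit, contBadR]
    · have hcb : (c == '/') = false := by simp [hc]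
      have hms : mySplit (c :: cs) = (c :: h0) :: t0 := by
        simp [mySplit, hc, hsp]
      have hd := disallowedA_of_ne_slash c hc
      by_cases hp : prev = '/'
      · subst hp
        have hbs : badStep '/' c
            = (((c.toNat ≤ 31) || c.toNat == 127 || c == '\\' || c == ':')
               || (c == '-' || c == '.' || c == ' ')) := by
          simp only [badStep, hcb, Bool.false_and, Bool.or_false, beq_self_eq_true,
            Bool.true_and]
          cases (c == ' ') <;> simp
        cases hb : (((c.toNat ≤ 31 : Bool)) || c.toNat == 127 || c == '\\' || c == ':'
               || (c == '-' || c == '.' || c == ' '))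
        · simp only [Bool.or_eq_false_iff] at hb
          simp [scanB, hbs, hb.1, hb.2, scanRHS, hms, partBadR, hd, ih c, hcb, hsp]
        · simp only [scanB, hbs, hb, if_pos, scanRHS, hms, beq_self_eq_true,
            List.any_cons, partBadR, hd]
          apply Eq.symm
          rw [Bool.not_eq_false']
          simp only [Bool.or_eq_true] at hb ⊢
          tauto
      · have hpb : (prev == '/') = false := by simp [hp]
        have hbs : badStep prev c
            = (((c.toNat ≤ 31) || c.toNat == 127 || c == '\\' || c == ':')
               || (prev == ' ' && c == ' ')) := by
          simp only [badStep, hcb, hpb, Bool.false_and, Bool.or_false]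
          cases (prev == ' ') <;> cases (c == ' ') <;> simp
        cases hb : (((c.toNat ≤ 31 : Bool)) || c.toNat == 127 || c == '\\' || c == ':'
               || (prev == ' ' && c == ' '))
        · simp only [Bool.or_eq_false_iff] at hb
          simp [scanB, hbs, hb.1, hb.2, scanRHS, hms, hd, ih c, hcb, hpb, hsp, contBadR]
        · simp only [scanB, hbs, hb, if_pos, scanRHS, hms, hpb, Bool.false_eq_true, if_false,
            List.headD_cons, List.tail_cons, contBadR, hd]
          apply Eq.symm
          rw [Bool.not_eq_false']
          simp only [Bool.or_eq_true, Bool.and_eq_true] at hb ⊢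
          tauto

-- ===== VERDICT (by name: the statement is the Claim_ definition above) =====
theorem sanitized_spec : Claim_equal_sanitized := by
  intro path _
  unfold Spec_sanitized sanitized sanitized_alt
  split_ifs with h
  · rfl
  · rw [scanB_eq_scanRHS path.toList '/']
    simp only [scanRHS, beq_self_eq_true, if_pos]
    rw [show partBadA = partBadR from funext partBadA_eq]
    simp [PySem.Chars.split?, splitOn_eq_mySplit]
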